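-- pv_equiv track=rewrite | github.com/Chrisaor/StudyPython | GeeksforGeeks/Practice/3. Easy/27.ProductArrayPuzzle.py | product_array_puzzle
-- ===== SOURCE A (Python) =====
-- def product_array_puzzle(arr):
--     prod = 1
--     temp = list()
--     result = list()
--     for i in range(len(arr)):
--         temp = arr[:i] + arr[i+1:]
--         for j in temp:
--             prod *= j
--         result.append(str(prod))
--         prod = 1
--     return ' '.join(result)
-- ===== SOURCE B (Python) =====
-- def product_array_puzzle(arr):
--     suf = [1]
--     for x in reversed(arr):
--         suf.append(x * suf[-1])
--     suf.reverse()
--     res = []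
--     pre = 1
--     for x, s in zip(arr, suf[1:]):
--         res.append(str(pre * s))
--         pre *= x
--     return ' '.join(res)
-- ===== Notes on version B (the rewrite author's own statement) =====
-- stated objective: alternative
-- what changed: Replaced the per-index rebuild of the other-elements list and its inner product loop by a suffix-product array plus a running prefix product, one pass each (fewer multiplications; measured ~1.5-1.9x at mid sizes, unconfirmed at the largest).
import Mathlib
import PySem

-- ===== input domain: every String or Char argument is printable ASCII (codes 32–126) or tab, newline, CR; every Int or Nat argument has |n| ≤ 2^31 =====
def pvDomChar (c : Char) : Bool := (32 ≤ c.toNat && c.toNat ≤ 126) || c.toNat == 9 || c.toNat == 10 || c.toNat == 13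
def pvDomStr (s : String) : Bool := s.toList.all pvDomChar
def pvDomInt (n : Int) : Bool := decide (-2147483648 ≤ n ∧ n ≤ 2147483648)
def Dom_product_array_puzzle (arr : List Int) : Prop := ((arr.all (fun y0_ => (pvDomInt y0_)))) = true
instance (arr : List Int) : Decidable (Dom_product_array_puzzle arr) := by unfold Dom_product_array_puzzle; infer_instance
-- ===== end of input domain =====

-- B computes each entry as prefix-product * suffix-product (one pass each) instead of A's per-index rebuild of the other-elements list with an inner product loop.

-- ===== PORT A =====
def product_array_puzzle (arr : List Int) : String :=
  let result :=
    (PySem.List.pyRange 0 (arr.length : Int) 1).foldl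
      (fun result i =>
        let temp := PySem.List.slice arr none (some i) ++ PySem.List.slice arr (some (i + 1)) none
        let prod := temp.foldl (fun p j => p * j) 1
        result ++ [PySem.Int.toStr prod]) []
  PySem.Str.join " " result

-- ===== PORT B =====
def product_array_puzzle_alt (arr : List Int) : String :=
  let suf := ((arr.reverse).foldl (fun s x => s ++ [x * s.getLastD 1]) [1]).reverse
  let res :=
    (List.zip arr (PySem.List.slice suf (some 1) none)).foldl
      (fun st p => (st.1 ++ [PySem.Int.toStr (st.2 * p.2)], st.2 * p.1)) (([] : List String), (1 : Int))
  PySem.Str.join " " res.1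

-- ===== PRECONDITION & SPEC =====
def Spec_product_array_puzzle (arr : List Int) (out : String) : Prop := out = product_array_puzzle_alt arr
instance (arr : List Int) (out : String) : Decidable (Spec_product_array_puzzle arr out) := by unfold Spec_product_array_puzzle; infer_instance

-- ===== CLAIM (what is proved, stated in full; the proofs are below) =====
def Claim_equal_product_array_puzzle : Prop := ∀ (arr : List Int), Dom_product_array_puzzle arr → Spec_product_array_puzzle arr (product_array_puzzle arr)

-- ===== LEMMAS AND PROOFS =====

-- suffix products: sufSpec xs = [prod xs[0:], prod xs[1:], …, 1]
def sufSpec : List Int → List Int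
  | [] => [1]
  | x :: t => (x * t.prod) :: sufSpec t

lemma sufSpec_struct (t : List Int) : sufSpec t = t.prod :: (sufSpec t).tail := by
  cases t <;> simp [sufSpec]

lemma suf_loop (arr : List Int) :
    ((arr.reverse).foldl (fun s x => s ++ [x * s.getLastD 1]) [1]).reverse = sufSpec arr := by
  induction arr with
  | nil => simp [sufSpec]
  | cons x t ih =>
    have h : (t.reverse).foldl (fun s x => s ++ [x * s.getLastD 1]) [1] = (sufSpec t).reverse := by
      rw [← ih, List.reverse_reverse]
    simp only [List.reverse_cons, List.foldl_append, List.foldl_cons, List.foldl_nil, h]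
    have hlast : ((sufSpec t).reverse).getLastD 1 = t.prod := by
      rw [sufSpec_struct t]; simp
    rw [hlast]
    simp [sufSpec]

-- the main loop of B with running prefix product `pre`
lemma b_loop : ∀ (xs : List Int) (pre : Int) (res : List String),
    ((List.zip xs ((sufSpec xs).tail)).foldl
      (fun st p => (st.1 ++ [PySem.Int.toStr (st.2 * p.2)], st.2 * p.1)) (res, pre)).1
    = res ++ (List.range xs.length).map
        (fun k => PySem.Int.toStr (pre * (xs.take k).prod * (xs.drop (k + 1)).prod)) := by
  intro xs
  induction xs with
  | nil => intro pre res; simp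
  | cons x t ih =>
    intro pre res
    have hz : List.zip (x :: t) ((sufSpec (x :: t)).tail)
        = (x, t.prod) :: List.zip t ((sufSpec t).tail) := by
      show List.zip (x :: t) (sufSpec t) = _
      rw [sufSpec_struct t]; rfl
    rw [hz]
    simp only [List.foldl_cons]
    rw [ih (pre * x) (res ++ [PySem.Int.toStr (pre * t.prod)])]
    rw [List.length_cons, List.range_succ_eq_map, List.map_cons, List.map_map]
    simp only [List.take_zero, List.prod_nil, List.drop_succ_cons, List.drop_zero,
      List.append_assoc, List.singleton_append, mul_one]
    congr 2
    apply List.map_congr_left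
    intro k _
    simp only [Function.comp_apply, List.take_succ_cons, List.prod_cons]
    congr 1
    ring

-- A's per-index value is prefix-product times suffix-product
lemma a_loop (arr : List Int) :
    (PySem.List.pyRange 0 (arr.length : Int) 1).foldl
      (fun result i =>
        result ++ [PySem.Int.toStr ((PySem.List.slice arr none (some i) ++
          PySem.List.slice arr (some (i + 1)) none).foldl (fun p j => p * j) 1)]) []
    = (List.range arr.length).map
        (fun k => PySem.Int.toStr ((arr.take k).prod * (arr.drop (k + 1)).prod)) := by
  rw [PySem.List.pyRange_zero_natCast, List.foldl_map, PySem.List.foldl_append_singleton_eq_map,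
    List.nil_append]
  apply List.map_congr_left
  intro k _
  have h1 : PySem.List.slice arr none (some (k : Int)) = arr.take k :=
    PySem.List.slice_to_natCast arr k
  have h2 : PySem.List.slice arr (some ((k : Int) + 1)) none = arr.drop (k + 1) := by
    have : ((k : Int) + 1) = ((k + 1 : Nat) : Int) := by push_cast; ring
    rw [this, PySem.List.slice_from_natCast]
  rw [h1, h2]
  congr 1
  rw [← List.prod_eq_foldl, List.prod_append]

-- ===== VERDICT (by name: the statement is the Claim_ definition above) =====
theorem product_array_puzzle_spec : Claim_equal_product_array_puzzle := by
  intro arr _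
  show product_array_puzzle arr = product_array_puzzle_alt arr
  simp only [product_array_puzzle, product_array_puzzle_alt, suf_loop,
    PySem.List.slice_from_one, a_loop, b_loop, List.nil_append]
  congr 1
  apply List.map_congr_left
  intro k _
  congr 1
  ring
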